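-- pv_equiv track=rewrite | github.com/jkatzy/ML4SE-toolkit | src/satd_annotate/satd-annotate-spans.py | decode_bitmask_string
-- ===== SOURCE A (Python) =====
-- def decode_bitmask_string(mask: str) -> list[tuple[int, int]]:
--     spans = []
--     start = None
--     for i, bit in enumerate(mask):
--         if bit == '1':
--             if start is None:
--                 start = i
--         else:
--             if start is not None:
--                 spans.append((start, i))
--                 start = None
--     if start is not None:
--         spans.append((start, len(mask)))
--     return spans
-- ===== SOURCE B (Python) =====
-- import re
--
-- def decode_bitmask_string(mask: str) -> list[tuple[int, int]]:
--     return [(m.start(), m.end()) for m in re.finditer('1+', mask)]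
-- ===== Notes on version B (the rewrite author's own statement) =====
-- stated objective: idiomatic
-- what changed: Replaces the explicit start-tracking state machine with a regex scan via re.finditer over maximal runs of the character 1, each match's (start, end) being the half-open span directly.
import Mathlib
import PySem

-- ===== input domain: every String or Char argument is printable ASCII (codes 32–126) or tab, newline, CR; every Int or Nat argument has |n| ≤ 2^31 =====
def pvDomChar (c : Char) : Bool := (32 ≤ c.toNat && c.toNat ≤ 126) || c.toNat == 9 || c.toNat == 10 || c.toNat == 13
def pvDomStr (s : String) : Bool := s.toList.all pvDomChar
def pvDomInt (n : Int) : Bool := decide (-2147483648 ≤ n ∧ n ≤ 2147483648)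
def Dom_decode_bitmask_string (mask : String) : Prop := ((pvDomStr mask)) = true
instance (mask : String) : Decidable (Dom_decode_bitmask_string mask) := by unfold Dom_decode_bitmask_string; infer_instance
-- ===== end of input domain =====

-- B replaces A's start-tracking state machine with a regex-style scan over maximal runs of '1' (idiomatic; return value only).


-- ===== PORT A =====
-- loop body of A: for i, bit in enumerate(mask)
def pvStepA (st : List (Int × Int) × Option Int) (p : Int × Char) : List (Int × Int) × Option Int :=
  if p.2 = '1' then
    match st.2 with
    | none => (st.1, some p.1)
    | some _ => st
  else
    match st.2 with
    | some s => (st.1 ++ [(s, p.1)], none)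
    | none => st

-- A's trailing 'if start is not None: spans.append((start, len(mask)))'
def pvFinishA (r : List (Int × Int) × Option Int) (n : Int) : List (Int × Int) :=
  match r.2 with
  | some s => r.1 ++ [(s, n)]
  | none => r.1

def decode_bitmask_string (mask : String) : List (Int × Int) :=
  pvFinishA ((PySem.List.enumerate mask.toList).foldl pvStepA ([], none)) (mask.toList.length : Int)

-- ===== PORT B =====
-- regex scan for '1+': pvSeek looks for the start of the next match, pvRun extends the current match maximally
mutual
def pvSeek : List Char → Int → List (Int × Int)
  | [], _ => []
  | c :: cs, i => if c = '1' then pvRun cs (i + 1) i else pvSeek cs (i + 1)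

def pvRun : List Char → Int → Int → List (Int × Int)
  | [], i, s => [(s, i)]
  | c :: cs, i, s => if c = '1' then pvRun cs (i + 1) s else (s, i) :: pvSeek cs (i + 1)
end

def decode_bitmask_string_alt (mask : String) : List (Int × Int) :=
  pvSeek mask.toList 0

-- ===== PRECONDITION & SPEC =====
def Spec_decode_bitmask_string (mask : String) (out : List (Int × Int)) : Prop := out = decode_bitmask_string_alt mask
instance (mask : String) (out : List (Int × Int)) : Decidable (Spec_decode_bitmask_string mask out) := by unfold Spec_decode_bitmask_string; infer_instance

-- ===== CLAIM (what is proved, stated in full; the proofs are below) =====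
def Claim_equal_decode_bitmask_string : Prop := ∀ (mask : String), Dom_decode_bitmask_string mask → Spec_decode_bitmask_string mask (decode_bitmask_string mask)

-- ===== LEMMAS AND PROOFS =====
theorem pvMain : ∀ (cs : List Char) (i : Int) (spans : List (Int × Int)),
    (pvFinishA ((PySem.List.enumerate cs i).foldl pvStepA (spans, none)) (i + cs.length)
      = spans ++ pvSeek cs i)
    ∧ ∀ (s : Int),
      pvFinishA ((PySem.List.enumerate cs i).foldl pvStepA (spans, some s)) (i + cs.length)
      = spans ++ pvRun cs i s := by
  intro cs
  induction cs with
  | nil =>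
    intro i spans
    constructor
    · simp [PySem.List.enumerate_nil, pvFinishA, pvSeek]
    · intro s
      simp [PySem.List.enumerate_nil, pvFinishA, pvRun]
  | cons c cs ih =>
    intro i spans
    have hlen : i + ((c :: cs).length : Int) = (i + 1) + (cs.length : Int) := by
      simp; ring
    constructor
    · by_cases hc : c = '1'
      · subst hc
        simp only [PySem.List.enumerate_cons, List.foldl_cons, pvStepA, pvSeek, reduceIte]
        rw [hlen]
        exact (ih (i + 1) spans).2 i
      · simp only [PySem.List.enumerate_cons, List.foldl_cons, pvStepA, pvSeek, if_neg hc]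
        rw [hlen]
        exact (ih (i + 1) spans).1
    · intro s
      by_cases hc : c = '1'
      · subst hc
        simp only [PySem.List.enumerate_cons, List.foldl_cons, pvStepA, pvRun, reduceIte]
        rw [hlen]
        exact (ih (i + 1) spans).2 s
      · simp only [PySem.List.enumerate_cons, List.foldl_cons, pvStepA, pvRun, if_neg hc]
        rw [hlen, (ih (i + 1) (spans ++ [(s, i)])).1, List.append_assoc]
        rfl

-- ===== VERDICT (by name: the statement is the Claim_ definition above) =====
theorem decode_bitmask_string_spec : Claim_equal_decode_bitmask_string := by
  intro mask _
  unfold Spec_decode_bitmask_string decode_bitmask_string decode_bitmask_string_alt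
  have h := (pvMain mask.toList 0 []).1
  simpa using h
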